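-- pv_equiv track=rewrite | github.com/nontile/CodingTest | aaa.py | solution
-- ===== SOURCE A (Python) =====
-- def solution(S):
--     upp = []
--     low = []
--     for s in S:
--         if s.isupper():
--             upp.append(s)
--         else:
--             low.append(s)
--
--     balance = 0
--     for up in upp:
--         for lo in low:
--             if up.lower() == lo:
--                 balance += 1
--             else:
--                 balance -= 1
--     if balance == 0:
--         return -1
--     return balance
-- ===== SOURCE B (Python) =====
-- def solution(S):
--     upCount = {}
--     lowCount = {}
--     nu = 0
--     nl = 0
--     for c in S:
--         if c.isupper():
--             upCount[c] = upCount.get(c, 0) + 1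
--             nu += 1
--         else:
--             lowCount[c] = lowCount.get(c, 0) + 1
--             nl += 1
--     m = sum(k * lowCount.get(u.lower(), 0) for u, k in upCount.items())
--     balance = 2 * m - nu * nl
--     return -1 if balance == 0 else balance
-- ===== Notes on version B (the rewrite author's own statement) =====
-- stated objective: alternative
-- what changed: Replaces A's nested scan over all upper/lower pairs with one counting pass building two frequency tables and the algebraic identity balance = 2*matches - |uppers|*|lowers|.
import Mathlib
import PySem

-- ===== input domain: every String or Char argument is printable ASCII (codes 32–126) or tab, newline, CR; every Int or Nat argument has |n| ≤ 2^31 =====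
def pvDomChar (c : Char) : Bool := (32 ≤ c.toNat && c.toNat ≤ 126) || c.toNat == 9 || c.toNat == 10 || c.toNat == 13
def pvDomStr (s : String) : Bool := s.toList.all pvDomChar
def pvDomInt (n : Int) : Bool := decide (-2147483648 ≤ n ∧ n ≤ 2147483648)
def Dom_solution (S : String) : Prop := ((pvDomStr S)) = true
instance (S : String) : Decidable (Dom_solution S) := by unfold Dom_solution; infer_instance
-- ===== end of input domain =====

-- B replaces A's pairwise scan over every (upper, lower) pair by two frequency tables
-- and the identity balance = 2*matches - |uppers|*|lowers| (objective: alternative).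

-- ===== PORT A =====
def solution (S : String) : Int :=
  let p := S.toList.foldl
    (fun (p : List Char × List Char) s =>
      if PySem.Chars.isupper s then (p.1 ++ [s], p.2) else (p.1, p.2 ++ [s]))
    ([], [])
  let balance : Int := p.1.foldl
    (fun b up => p.2.foldl
      (fun b lo => if PySem.Chars.lowerChar up == lo then b + 1 else b - 1) b) 0
  if balance = 0 then -1 else balance

-- ===== PORT B =====
def solution_alt (S : String) : Int :=
  let st := S.toList.foldl
    (fun (st : PySem.Dict Char Int × PySem.Dict Char Int × Int × Int) c =>
      if PySem.Chars.isupper c then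
        (st.1.insert c (st.1.getD c 0 + 1), st.2.1, st.2.2.1 + 1, st.2.2.2)
      else
        (st.1, st.2.1.insert c (st.2.1.getD c 0 + 1), st.2.2.1, st.2.2.2 + 1))
    (PySem.Dict.empty, PySem.Dict.empty, 0, 0)
  let m : Int := st.1.items.foldl
    (fun acc kv => acc + kv.2 * st.2.1.getD (PySem.Chars.lowerChar kv.1) 0) 0
  let balance := 2 * m - st.2.2.1 * st.2.2.2
  if balance = 0 then -1 else balance

-- ===== PRECONDITION & SPEC =====
def Spec_solution (S : String) (out : Int) : Prop := out = solution_alt S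
instance (S : String) (out : Int) : Decidable (Spec_solution S out) := by unfold Spec_solution; infer_instance

-- ===== CLAIM (what is proved, stated in full; the proofs are below) =====
def Claim_equal_solution : Prop := ∀ (S : String), Dom_solution S → Spec_solution S (solution S)

-- ===== LEMMAS AND PROOFS =====

-- A's partition loop produces the two filters.
theorem pvA_partition (l : List Char) (u v : List Char) :
    l.foldl (fun (p : List Char × List Char) s =>
      if PySem.Chars.isupper s then (p.1 ++ [s], p.2) else (p.1, p.2 ++ [s])) (u, v)
    = (u ++ l.filter (fun c => PySem.Chars.isupper c),
       v ++ l.filter (fun c => !PySem.Chars.isupper c)) := by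
  induction l generalizing u v with
  | nil => simp
  | cons a t ih =>
    by_cases h : PySem.Chars.isupper a = true <;> simp [h, ih]

-- A's inner loop over `low` for a fixed upper char.
theorem pvA_inner (x : Char) (low : List Char) (b : Int) :
    low.foldl (fun b lo => if x == lo then b + 1 else b - 1) b
    = b + 2 * (low.count x : Int) - low.length := by
  induction low generalizing b with
  | nil => simp
  | cons a t ih =>
    rw [List.foldl_cons, ih, List.count_cons]
    by_cases h : x = a
    · simp [h]; push_cast; ring
    · have h2 : (a == x) = false := beq_eq_false_iff_ne.mpr (Ne.symm h)
      have h3 : (x == a) = false := by simp [h]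
      simp [h2, h3]; push_cast; ring

-- A's outer loop.
theorem pvA_outer (upp low : List Char) (b : Int) :
    upp.foldl (fun b up => low.foldl
      (fun b lo => if PySem.Chars.lowerChar up == lo then b + 1 else b - 1) b) b
    = b + 2 * ((upp.map (fun u => (low.count (PySem.Chars.lowerChar u) : Int))).sum)
        - (upp.length : Int) * low.length := by
  induction upp generalizing b with
  | nil => simp
  | cons a t ih =>
    rw [List.foldl_cons, pvA_inner, ih]
    simp only [List.map_cons, List.sum_cons, List.length_cons]
    push_cast; ring

-- B's combined counting loop splits into two Counter builds plus lengths.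
theorem pvB_split (l : List Char) (d1 d2 : PySem.Dict Char Int) (n1 n2 : Int) :
    l.foldl (fun (st : PySem.Dict Char Int × PySem.Dict Char Int × Int × Int) c =>
      if PySem.Chars.isupper c then
        (st.1.insert c (st.1.getD c 0 + 1), st.2.1, st.2.2.1 + 1, st.2.2.2)
      else
        (st.1, st.2.1.insert c (st.2.1.getD c 0 + 1), st.2.2.1, st.2.2.2 + 1))
      (d1, d2, n1, n2)
    = ((l.filter (fun c => PySem.Chars.isupper c)).foldl
         (fun d x => d.insert x (d.getD x 0 + 1)) d1,
       (l.filter (fun c => !PySem.Chars.isupper c)).foldl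
         (fun d x => d.insert x (d.getD x 0 + 1)) d2,
       n1 + ((l.filter (fun c => PySem.Chars.isupper c)).length : Int),
       n2 + ((l.filter (fun c => !PySem.Chars.isupper c)).length : Int)) := by
  induction l generalizing d1 d2 n1 n2 with
  | nil => simp
  | cons a t ih =>
    by_cases h : PySem.Chars.isupper a = true <;>
      simp [h, ih] <;> push_cast <;> ring

-- fold-with-add is a map-sum.
theorem pvFoldAdd {α : Type} (l : List α) (g : α → Int) (b : Int) :
    l.foldl (fun acc x => acc + g x) b = b + (l.map g).sum := by
  induction l generalizing b with
  | nil => simp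
  | cons a t ih => simp [ih]; ring

-- group-by-value: summing f over a list = summing count·f over its distinct values.
theorem pvGroup (l : List Char) (f : Char → Int) :
    ((PySem.Set.ofList l).map (fun k => (l.count k : Int) * f k)).sum
    = (l.map f).sum := by
  have hnd : (PySem.Set.ofList l).Nodup := PySem.Set.nodup_ofList l
  have hfin : (PySem.Set.ofList l).toFinset = l.toFinset := by
    ext x; simp [PySem.Set.mem_ofList]
  rw [← List.sum_toFinset _ hnd, hfin, Finset.sum_list_map_count]
  apply Finset.sum_congr rfl
  intro x _
  simp

-- the two result values feed the same final if-test.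
theorem pvIfCongr (x y : Int) (h : x = y) :
    (if x = 0 then (-1 : Int) else x) = (if y = 0 then -1 else y) := by rw [h]

theorem pvBalanceEq (S : String) : solution S = solution_alt S := by
  unfold solution solution_alt
  rw [pvA_partition, pvB_split]
  simp only [List.nil_append]
  set upp := S.toList.filter (fun c => PySem.Chars.isupper c) with hupp
  set low := S.toList.filter (fun c => !PySem.Chars.isupper c) with hlow
  rw [pvA_outer,
      PySem.Dict.foldl_insert_getD_add_one_eq_counter,
      PySem.Dict.foldl_insert_getD_add_one_eq_counter,
      PySem.Dict.items_counter]
  apply pvIfCongr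
  rw [pvFoldAdd]
  simp only [List.map_map, Function.comp_def, PySem.Dict.getD_counter]
  rw [pvGroup upp (fun u => (low.count (PySem.Chars.lowerChar u) : Int))]
  ring

-- ===== VERDICT (by name: the statement is the Claim_ definition above) =====
theorem solution_spec : Claim_equal_solution := by
  intro S _
  unfold Spec_solution
  exact pvBalanceEq S
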